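-- pv_equiv track=rewrite | github.com/ebony72/Mahjong | utils/pusolx.py | fourteentile
-- ===== SOURCE A (Python) =====
-- def fourteentile(V):
--     for i in range(0,13):
--         if V[i] > V[i+1]:
--             return False
--     for i in range(0,10):
--         if V[i] >= V[i+4]:
--             return False
--     return True
-- ===== SOURCE B (Python) =====
-- def fourteentile(V):
--     if any(V[i] > V[i + 1] for i in range(13)):
--         return False
--     W = V[:14]
--     return all(W.count(x) <= 4 for x in W)
-- ===== Notes on version B (the rewrite author's own statement) =====
-- stated objective: alternative
-- what changed: B rejects an unsorted hand with one lazy adjacent-pair scan, then validates duplicates by counting occurrences of each tile in the first 14 (count <= 4) instead of A's sorted-window comparison V[i] >= V[i+4].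
import Mathlib
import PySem

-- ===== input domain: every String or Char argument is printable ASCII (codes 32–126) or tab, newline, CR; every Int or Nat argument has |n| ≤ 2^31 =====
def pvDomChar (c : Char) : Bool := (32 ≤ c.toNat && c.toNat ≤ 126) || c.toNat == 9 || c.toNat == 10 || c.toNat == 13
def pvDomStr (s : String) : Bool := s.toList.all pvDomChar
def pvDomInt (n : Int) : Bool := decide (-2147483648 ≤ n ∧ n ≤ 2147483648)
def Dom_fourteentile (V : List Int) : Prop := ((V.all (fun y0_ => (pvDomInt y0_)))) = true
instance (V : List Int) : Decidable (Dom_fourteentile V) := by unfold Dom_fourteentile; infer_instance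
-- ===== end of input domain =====

-- B rejects an unsorted hand with one lazy adjacent-pair scan, then validates the 14 tiles by
-- counting occurrences (at most 4 of each value) instead of A's sorted-window comparison V[i] >= V[i+4].

-- ===== PORT A =====
def fourteentileLoop1 (V : List Int) : List Int → Bool
  | [] => true
  | i :: is =>
      if PySem.List.pyGetD V i 0 > PySem.List.pyGetD V (i + 1) 0 then false
      else fourteentileLoop1 V is

def fourteentileLoop2 (V : List Int) : List Int → Bool
  | [] => true
  | i :: is =>
      if PySem.List.pyGetD V i 0 ≥ PySem.List.pyGetD V (i + 4) 0 then false
      else fourteentileLoop2 V is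

def fourteentile (V : List Int) : Bool :=
  if fourteentileLoop1 V (PySem.List.pyRange 0 13) = false then false
  else if fourteentileLoop2 V (PySem.List.pyRange 0 10) = false then false
  else true

-- ===== PORT B =====
def fourteentile_alt (V : List Int) : Bool :=
  if (PySem.List.pyRange 0 13).any (fun i =>
      PySem.List.pyGetD V i 0 > PySem.List.pyGetD V (i + 1) 0) then false
  else
    let W := PySem.List.slice V none (some 14)
    W.all (fun x => PySem.List.count W x ≤ 4)

-- ===== PRECONDITION & SPEC =====
-- Pre_ excludes exactly the inputs on which Python A raises IndexError: lists shorter than 14 tiles whose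
-- adjacent pairs are all non-decreasing (the scan reaches the out-of-range access); B raises there too.
def Pre_fourteentile (V : List Int) : Prop := 14 ≤ V.length ∨ ¬ List.Pairwise (· ≤ ·) V
instance (V : List Int) : Decidable (Pre_fourteentile V) := by unfold Pre_fourteentile; infer_instance
def pvWitness_fourteentile : List Int := [1, 1, 2, 2, 3, 3, 4, 4, 5, 5, 6, 6, 7, 7]

def Spec_fourteentile (V : List Int) (out : Bool) : Prop := out = fourteentile_alt V
instance (V : List Int) (out : Bool) : Decidable (Spec_fourteentile V out) := by unfold Spec_fourteentile; infer_instance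

-- ===== CLAIM (what is proved, stated in full; the proofs are below) =====
def Claim_equal_fourteentile : Prop := ∀ (V : List Int), Dom_fourteentile V → Pre_fourteentile V → Spec_fourteentile V (fourteentile V)

-- ===== LEMMAS AND PROOFS =====
lemma sorted_getElem_le (W : List Int) (hs : W.Pairwise (· ≤ ·)) {i j : ℕ}
    (hij : i ≤ j) (hj : j < W.length) : W[i]'(by omega) ≤ W[j] := by
  rcases Nat.lt_or_ge i j with h | h
  · exact List.pairwise_iff_getElem.mp hs i j (by omega) hj h
  · have : i = j := by omega
    subst this; exact le_refl _

lemma window_iff_count (W : List Int) (hs : W.Pairwise (· ≤ ·)) :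
    (∀ i, (h : i + 4 < W.length) → W[i] < W[i + 4]) ↔ ∀ x : Int, W.count x ≤ 4 := by
  constructor
  · intro hw x
    by_contra hcnt
    push Not at hcnt
    have h5 : List.Sublist (List.replicate 5 x) W :=
      List.replicate_sublist_iff.mpr (by omega)
    obtain ⟨is, his, hp⟩ := List.sublist_eq_map_getElem h5
    have hlen5 : is.length = 5 := by
      have := congrArg List.length his
      simpa using this.symm
    rcases is with _ | ⟨i0, _ | ⟨i1, _ | ⟨i2, _ | ⟨i3, _ | ⟨i4, _ | ⟨i5, is⟩⟩⟩⟩⟩⟩ <;> simp at hlen5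
    simp [List.replicate_succ] at his
    obtain ⟨h0, h1, h2, h3, h4⟩ := his
    have hpg := List.pairwise_iff_getElem.mp hp
    have a1 : (i0 : ℕ) < (i1 : ℕ) := by simpa using hpg 0 1 (by simp) (by simp) (by omega)
    have a2 : (i1 : ℕ) < (i2 : ℕ) := by simpa using hpg 1 2 (by simp) (by simp) (by omega)
    have a3 : (i2 : ℕ) < (i3 : ℕ) := by simpa using hpg 2 3 (by simp) (by simp) (by omega)
    have a4 : (i3 : ℕ) < (i4 : ℕ) := by simpa using hpg 3 4 (by simp) (by simp) (by omega)
    have hlt : (i0 : ℕ) + 4 ≤ (i4 : ℕ) := by omega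
    have hi : (i0 : ℕ) + 4 < W.length := by have := i4.isLt; omega
    have hmid : W[(i0 : ℕ) + 4] ≤ W[(i4 : ℕ)] := sorted_getElem_le W hs hlt i4.isLt
    have hw0 := hw i0 hi
    omega
  · intro hc i hi
    have hle : W[i]'(by omega) ≤ W[i + 4] := sorted_getElem_le W hs (by omega) hi
    rcases lt_or_eq_of_le hle with h | h
    · exact h
    · exfalso
      set x := W[i]'(by omega) with hx
      have hsub : List.Sublist ((W.drop i).take 5) W :=
        (List.take_sublist 5 _).trans (List.drop_sublist i W)
      have hlen : ((W.drop i).take 5).length = 5 := by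
        simp [List.length_take, List.length_drop]; omega
      have heq : (W.drop i).take 5 = List.replicate 5 x := by
        rw [List.eq_replicate_iff]
        refine ⟨hlen, ?_⟩
        intro b hb
        obtain ⟨k, hk, hbk⟩ := List.mem_iff_getElem.mp hb
        rw [hlen] at hk
        have e1 : ((W.drop i).take 5)[k]'(by omega) = W[i + k]'(by omega) := by
          simp [List.getElem_take, List.getElem_drop]
        have l1 : x ≤ W[i + k]'(by omega) := sorted_getElem_le W hs (by omega) (by omega)
        have l2 : W[i + k]'(by omega) ≤ W[i + 4] := sorted_getElem_le W hs (by omega) hi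
        rw [← hbk, e1]
        omega
      have : 5 ≤ W.count x := by
        have := List.Sublist.count_le x hsub
        rw [heq] at this
        simpa using this
      have := hc x
      omega


-- a list whose adjacent pairs are all non-decreasing is pairwise non-decreasing, contrapositively
lemma exists_desc (l : List Int) (h : ¬ l.Pairwise (· ≤ ·)) :
    ∃ i, ∃ _ : i + 1 < l.length, l[i + 1] < l[i] := by
  by_contra hc
  push Not at hc
  apply h
  have hch : List.IsChain (· ≤ ·) l := by
    rw [List.isChain_iff_getElem]
    intro i hi
    exact hc i (by omega)
  exact hch.pairwise

-- A's first loop returns false as soon as some listed index shows a descent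
lemma loop1_false (V : List Int) (k : Int) :
    ∀ l : List Int, k ∈ l → PySem.List.pyGetD V k 0 > PySem.List.pyGetD V (k + 1) 0 →
      fourteentileLoop1 V l = false := by
  intro l
  induction l with
  | nil => simp
  | cons i is ih =>
    intro hm hd
    by_cases hi : PySem.List.pyGetD V i 0 > PySem.List.pyGetD V (i + 1) 0
    · simp [fourteentileLoop1, hi]
    · rcases List.mem_cons.mp hm with rfl | hm'
      · exact absurd hd hi
      · simp [fourteentileLoop1, hi, ih hm' hd]

-- both programs on a full 14-tile prefix
lemma fourteentile_eq_alt_cons (x0 x1 x2 x3 x4 x5 x6 x7 x8 x9 x10 x11 x12 x13 : Int) (t : List Int) :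
    fourteentile (x0::x1::x2::x3::x4::x5::x6::x7::x8::x9::x10::x11::x12::x13::t)
      = fourteentile_alt (x0::x1::x2::x3::x4::x5::x6::x7::x8::x9::x10::x11::x12::x13::t) := by
  rw [Bool.eq_iff_iff]
  simp only [fourteentile, fourteentile_alt, fourteentileLoop1, fourteentileLoop2,
    PySem.List.slice_to _ (by norm_num : (0:Int) ≤ 14),
    show ((14:Int).toNat) = 14 from rfl,
    show (PySem.List.pyRange 0 13 : List Int) = [0,1,2,3,4,5,6,7,8,9,10,11,12] from by decide,
    show (PySem.List.pyRange 0 10 : List Int) = [0,1,2,3,4,5,6,7,8,9] from by decide]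
  norm_num [PySem.List.pyGetD_ofNat', List.getD, List.take_succ_cons, List.take_zero]
  intro h1 h2 h3 h4 h5 h6 h7 h8 h9 h10 h11 h12 h13
  have hch : List.IsChain (· ≤ ·) [x0, x1, x2, x3, x4, x5, x6, x7, x8, x9, x10, x11, x12, x13] := by
    simp only [List.isChain_cons_cons, List.isChain_singleton, and_true]
    exact ⟨h1, h2, h3, h4, h5, h6, h7, h8, h9, h10, h11, h12, h13⟩
  have hp : List.Pairwise (· ≤ ·) [x0, x1, x2, x3, x4, x5, x6, x7, x8, x9, x10, x11, x12, x13] :=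
    List.IsChain.pairwise hch
  refine Iff.trans ?_ ((window_iff_count _ hp).trans ?_)
  · constructor
    · rintro ⟨c0, c1, c2, c3, c4, c5, c6, c7, c8, c9⟩ i hi
      have hi' : i < 10 := by simp at hi; omega
      interval_cases i <;> simpa
    · intro h
      exact ⟨by simpa using h 0 (by simp), by simpa using h 1 (by simp),
        by simpa using h 2 (by simp), by simpa using h 3 (by simp),
        by simpa using h 4 (by simp), by simpa using h 5 (by simp),
        by simpa using h 6 (by simp), by simpa using h 7 (by simp),
        by simpa using h 8 (by simp), by simpa using h 9 (by simp)⟩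
  · constructor
    · intro h
      have e0 := h x0
      rw [List.count_cons_self] at e0
      exact ⟨by omega, h x1, h x2, h x3, h x4, h x5, h x6, h x7, h x8, h x9, h x10, h x11, h x12, h x13⟩
    · rintro ⟨c0, c1, c2, c3, c4, c5, c6, c7, c8, c9', c10, c11, c12, c13⟩ x
      by_cases hx : x ∈ [x0, x1, x2, x3, x4, x5, x6, x7, x8, x9, x10, x11, x12, x13]
      · simp only [List.mem_cons, List.not_mem_nil, or_false] at hx
        rcases hx with rfl|rfl|rfl|rfl|rfl|rfl|rfl|rfl|rfl|rfl|rfl|rfl|rfl|rfl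
        · rw [List.count_cons_self]; omega
        · exact c1
        · exact c2
        · exact c3
        · exact c4
        · exact c5
        · exact c6
        · exact c7
        · exact c8
        · exact c9'
        · exact c10
        · exact c11
        · exact c12
        · exact c13
      · simp [List.count_eq_zero_of_not_mem hx]


-- ===== VERDICT (by name: the statement is the Claim_ definition above) =====
theorem fourteentile_spec : Claim_equal_fourteentile := by
  intro V hdom hpre
  unfold Spec_fourteentile
  by_cases hlen : 14 ≤ V.length
  · clear hpre
    rcases V with _ | ⟨x0, V⟩
    · simp at hlen
    rcases V with _ | ⟨x1, V⟩
    · simp at hlen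
    rcases V with _ | ⟨x2, V⟩
    · simp at hlen
    rcases V with _ | ⟨x3, V⟩
    · simp at hlen
    rcases V with _ | ⟨x4, V⟩
    · simp at hlen
    rcases V with _ | ⟨x5, V⟩
    · simp at hlen
    rcases V with _ | ⟨x6, V⟩
    · simp at hlen
    rcases V with _ | ⟨x7, V⟩
    · simp at hlen
    rcases V with _ | ⟨x8, V⟩
    · simp at hlen
    rcases V with _ | ⟨x9, V⟩
    · simp at hlen
    rcases V with _ | ⟨x10, V⟩
    · simp at hlen
    rcases V with _ | ⟨x11, V⟩
    · simp at hlen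
    rcases V with _ | ⟨x12, V⟩
    · simp at hlen
    rcases V with _ | ⟨x13, V⟩
    · simp at hlen
    exact fourteentile_eq_alt_cons x0 x1 x2 x3 x4 x5 x6 x7 x8 x9 x10 x11 x12 x13 V
  · rcases hpre with hlen' | hnp
    · omega
    obtain ⟨i, hi, hdesc⟩ := exists_desc V hnp
    have hk13 : i < 13 := by omega
    have hmem : ((i : Nat) : Int) ∈ PySem.List.pyRange 0 13 :=
      PySem.List.mem_pyRange_one.mpr ⟨by positivity, by exact_mod_cast hk13⟩
    have hgd : PySem.List.pyGetD V ((i : Nat) : Int) 0 > PySem.List.pyGetD V (((i : Nat) : Int) + 1) 0 := by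
      have e1 : PySem.List.pyGetD V ((i : Nat) : Int) 0 = V[i] := by
        rw [PySem.List.pyGetD_natCast, List.getD_eq_getElem _ _ (by omega)]
      have e2 : PySem.List.pyGetD V (((i : Nat) : Int) + 1) 0 = V[i + 1] := by
        rw [show ((i : Nat) : Int) + 1 = (((i + 1 : Nat)) : Int) from by push_cast; ring,
          PySem.List.pyGetD_natCast, List.getD_eq_getElem _ _ (by omega)]
      rw [e1, e2]
      exact hdesc
    have hA : fourteentile V = false := by
      have h1 := loop1_false V ((i : Nat) : Int) (PySem.List.pyRange 0 13) hmem hgd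
      simp [fourteentile, h1]
    have hB : fourteentile_alt V = false := by
      have hany : (PySem.List.pyRange 0 13).any (fun j =>
          PySem.List.pyGetD V j 0 > PySem.List.pyGetD V (j + 1) 0) = true :=
        List.any_eq_true.mpr ⟨((i : Nat) : Int), hmem, by simpa using hgd⟩
      simp [fourteentile_alt, hany]
    rw [hA, hB]
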